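-- pv_equiv track=rewrite | github.com/alter027/i2cs_homework | 18_summer/main.py | Count
-- ===== SOURCE A (Python) =====
-- def Count(rows,title):
--     num = rows[0].index(title)
--     tri = {}
--     for row in rows:
--         try:
--             if (row[num] == '') or (row[num] == title):
--                 pass
--             else:
--                 tri[row[num]] = tri.get(row[num],0) + 1
--         except:
--             pass
--     return list(tri.keys()),list(tri.values())
-- ===== SOURCE B (Python) =====
-- def Count(rows, title):
--     num = rows[0].index(title)
--     vals = []
--     for row in rows:
--         try:
--             v = row[num]
--             if v != '' and v != title:
--                 vals.append(v)
--         except: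
--             pass
--     keys, counts = [], []
--     while vals:
--         k = vals[0]
--         rest = [x for x in vals if x != k]
--         keys.append(k)
--         counts.append(len(vals) - len(rest))
--         vals = rest
--     return keys, counts
-- ===== Notes on version B (the rewrite author's own statement) =====
-- stated objective: alternative
-- what changed: B drops the counting dict entirely: it collects the kept cell values into a flat list, then repeatedly takes the first remaining value as the next key, counts and removes all its copies by filtering, looping until the list is empty (selection-by-partition instead of a single dict-accumulating pass).
import Mathlib
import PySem

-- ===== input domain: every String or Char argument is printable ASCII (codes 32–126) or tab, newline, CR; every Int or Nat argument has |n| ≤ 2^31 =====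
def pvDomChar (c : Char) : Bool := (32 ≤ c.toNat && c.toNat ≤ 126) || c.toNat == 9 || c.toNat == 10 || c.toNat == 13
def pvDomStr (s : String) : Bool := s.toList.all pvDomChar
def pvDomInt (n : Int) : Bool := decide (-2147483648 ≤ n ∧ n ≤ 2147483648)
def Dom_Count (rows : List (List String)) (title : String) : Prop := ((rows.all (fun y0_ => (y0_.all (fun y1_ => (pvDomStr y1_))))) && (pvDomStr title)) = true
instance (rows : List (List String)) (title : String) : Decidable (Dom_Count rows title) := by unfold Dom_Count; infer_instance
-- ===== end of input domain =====

-- B drops A's counting dict: it collects the kept cell values into a flat list, then repeatedly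
-- takes the first remaining value as the next key and counts/removes all its copies by filtering;
-- alternative decomposition, same results.


-- ===== PORT A =====
-- num = rows[0].index(title); one pass accumulating counts in an insertion-ordered dict;
-- row[num] out of range is skipped (try/except).  On rows = [] or title ∉ rows[0] Python
-- raises (IndexError/ValueError): those inputs are excluded by Pre_ and the port returns ([], []).
def Count (rows : List (List String)) (title : String) : List String × List Int :=
  match PySem.List.index? (rows.headD []) title with
  | none => ([], [])
  | some num =>
    let tri := rows.foldl (fun tri row =>
      match PySem.List.pyGet? row (num : Int) with
      | none => tri
      | some v => if v = "" ∨ v = title then tri else tri.insert v (tri.getD v 0 + 1))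
      PySem.Dict.empty
    (tri.keys, tri.values)

-- ===== PORT B =====
-- termination helper for groupLoop (cited in its decreasing_by)
theorem filter_ne_head_len_lt {k : String} {t : List String} :
    ((k :: t).filter (fun x => x ≠ k)).length < (k :: t).length := by
  simpa [List.filter_cons] using
    Nat.lt_succ_of_le (List.length_filter_le (fun x => decide (x ≠ k)) t)

-- the while loop: keys/counts grow by append; vals shrinks to its ≠-head part each turn
def groupLoop : List String → List String → List Int → List String × List Int
  | [], keys, counts => (keys, counts)
  | k :: t, keys, counts =>
    let rest := (k :: t).filter (fun x => x ≠ k)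
    groupLoop rest (keys ++ [k]) (counts ++ [((k :: t).length : Int) - rest.length])
termination_by vals _ _ => vals.length
decreasing_by exact filter_ne_head_len_lt

-- same num and per-row try/except, building a flat list of kept values, then the while loop above
def Count_alt (rows : List (List String)) (title : String) : List String × List Int :=
  match PySem.List.index? (rows.headD []) title with
  | none => ([], [])
  | some num =>
    let vals := rows.foldl (fun acc row =>
      match PySem.List.pyGet? row (num : Int) with
      | none => acc
      | some v => if v ≠ "" ∧ v ≠ title then acc ++ [v] else acc) []
    groupLoop vals [] []

-- ===== PRECONDITION & SPEC =====
-- A raises on rows = [] (IndexError on rows[0]) and on title ∉ rows[0] (ValueError from .index);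
-- exactly those inputs are excluded.
def Pre_Count (rows : List (List String)) (title : String) : Prop :=
  rows ≠ [] ∧ title ∈ rows.headD []
instance (rows : List (List String)) (title : String) : Decidable (Pre_Count rows title) := by unfold Pre_Count; infer_instance

def pvWitness_Count : List (List String) × String :=
  ([["name", "city"], ["a", "NY"], ["b", "NY"], ["c", "LA"], ["d"]], "city")

def Spec_Count (rows : List (List String)) (title : String) (out : List String × List Int) : Prop := out = Count_alt rows title
instance (rows : List (List String)) (title : String) (out : List String × List Int) : Decidable (Spec_Count rows title out) := by unfold Spec_Count; infer_instance

-- ===== CLAIM (what is proved, stated in full; the proofs are below) =====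
def Claim_equal_Count : Prop := ∀ (rows : List (List String)) (title : String), Dom_Count rows title → Pre_Count rows title → Spec_Count rows title (Count rows title)

-- ===== LEMMAS AND PROOFS =====

-- the kept values of one row (0 or 1 of them), shared characterisation of both loops
def keptVals (title : String) (num : Nat) (row : List String) : List String :=
  match PySem.List.pyGet? row (num : Int) with
  | none => []
  | some v => if v = "" ∨ v = title then [] else [v]

theorem a_fold_eq (title : String) (num : Nat) (rows : List (List String))
    (d : PySem.Dict String Int) :
    rows.foldl (fun tri row =>
      match PySem.List.pyGet? row (num : Int) with
      | none => tri
      | some v => if v = "" ∨ v = title then tri else tri.insert v (tri.getD v 0 + 1)) d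
    = (rows.flatMap (keptVals title num)).foldl
        (fun d x => d.insert x (d.getD x 0 + 1)) d := by
  induction rows generalizing d with
  | nil => rfl
  | cons r rs ih =>
    simp only [List.foldl_cons, List.flatMap_cons, List.foldl_append, keptVals]
    cases PySem.List.pyGet? r (num : Int) with
    | none => simpa using ih d
    | some v =>
      by_cases h : v = "" ∨ v = title
      · simp only [if_pos h, List.foldl_nil]
        simpa using ih d
      · simp only [if_neg h, List.foldl_cons]
        simpa using ih _

theorem b_fold_eq (title : String) (num : Nat) (rows : List (List String))
    (acc : List String) :
    rows.foldl (fun acc row =>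
      match PySem.List.pyGet? row (num : Int) with
      | none => acc
      | some v => if v ≠ "" ∧ v ≠ title then acc ++ [v] else acc) acc
    = acc ++ rows.flatMap (keptVals title num) := by
  induction rows generalizing acc with
  | nil => simp
  | cons r rs ih =>
    simp only [List.foldl_cons, List.flatMap_cons, keptVals]
    cases PySem.List.pyGet? r (num : Int) with
    | none => simpa using ih acc
    | some v =>
      by_cases h : v = "" ∨ v = title
      · have h' : ¬ (v ≠ "" ∧ v ≠ title) := by tauto
        simp only [if_neg h', if_pos h, List.nil_append]
        simpa using ih acc
      · have h' : v ≠ "" ∧ v ≠ title := by tauto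
        simp only [if_pos h', if_neg h]
        simpa using ih (acc ++ [v])

-- Set.ofList splits across an append of the accumulator
theorem foldl_add_split (l a b : List String) :
    l.foldl PySem.Set.add (a ++ b)
      = a ++ (l.filter (fun x => !(a.contains x))).foldl PySem.Set.add b := by
  induction l generalizing b with
  | nil => simp
  | cons x t ih =>
    simp only [List.foldl_cons, List.filter_cons]
    by_cases hx : x ∈ a
    · have h1 : PySem.Set.add (a ++ b) x = a ++ b := by
        simp [PySem.Set.add, hx]
      have hx' : a.contains x = true := by simpa using hx
      rw [h1]
      simp only [hx', Bool.not_true]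
      simpa using ih b
    · have hx' : a.contains x = false := by simpa using hx
      have h1 : PySem.Set.add (a ++ b) x = a ++ PySem.Set.add b x := by
        simp only [PySem.Set.add]
        by_cases hbx : x ∈ b
        · simp [hx, hbx]
        · simp [hx, hbx]
      rw [h1]
      simp only [hx', Bool.not_false]
      rw [ih (PySem.Set.add b x)]
      simp

-- dedup of a cons = head :: dedup of the tail with all copies of the head filtered out
theorem dedup_cons_filter (k : String) (t : List String) :
    PySem.List.dedup (k :: t) = k :: PySem.List.dedup (t.filter (fun x => x ≠ k)) := by
  have h1 : PySem.List.dedup (k :: t) = List.foldl PySem.Set.add ([k] ++ []) t := by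
    simp [PySem.List.dedup, PySem.Set.ofList, PySem.Set.add, PySem.Set.empty]
  rw [h1, foldl_add_split]
  have h2 : t.filter (fun x => !([k].contains x)) = t.filter (fun x => x ≠ k) := by
    apply List.filter_congr; intro x _
    simp [eq_comm]
  simp [PySem.List.dedup, PySem.Set.ofList]

-- t with all copies of k removed has length t.length - t.count k
theorem count_head_filter (k : String) (t : List String) :
    (t.filter (fun x => x ≠ k)).length + t.count k = t.length := by
  induction t with
  | nil => rfl
  | cons a t ih =>
    by_cases ha : a = k <;>
      simp [ha] at ih ⊢ <;> omega

-- removing all copies of k does not change the count of any other value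
theorem count_filter_ne (x k : String) (t : List String) (h : x ≠ k) :
    (t.filter (fun y => y ≠ k)).count x = t.count x := by
  induction t with
  | nil => rfl
  | cons a t ih =>
    by_cases ha : a = k <;>
      simp [List.count_cons, ha, Ne.symm h] at ih ⊢ <;> simp [ih]

-- groupLoop computes (dedup, per-key counts)
theorem groupLoop_eq (vals keys : List String) (counts : List Int) :
    groupLoop vals keys counts
      = (keys ++ PySem.List.dedup vals,
         counts ++ (PySem.List.dedup vals).map (fun k => (vals.count k : Int))) := by
  induction vals, keys, counts using groupLoop.induct with
  | case1 keys counts => simp [groupLoop, PySem.List.dedup, PySem.Set.ofList, PySem.Set.empty]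
  | case2 k t keys counts rest ih =>
    rw [groupLoop, ih, dedup_cons_filter]
    have hrest : rest = t.filter (fun x => x ≠ k) := by
      simp [rest]
    rw [hrest]
    have hlen : ((k :: t).length : Int) - ((t.filter (fun x => x ≠ k)).length : Int)
        = (((k :: t).count k : Nat) : Int) := by
      have h := count_head_filter k t
      simp only [List.length_cons, List.count_cons_self]
      omega
    have hmap : (PySem.List.dedup (t.filter (fun x => x ≠ k))).map
          (fun x => (((t.filter (fun x => x ≠ k)).count x : Nat) : Int))
        = (PySem.List.dedup (t.filter (fun x => x ≠ k))).map
          (fun x => (((k :: t).count x : Nat) : Int)) := by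
      apply List.map_congr_left
      intro x hx
      have hx' : x ∈ t.filter (fun y => y ≠ k) := by
        simpa [PySem.List.mem_dedup] using hx
      have hxk : x ≠ k := by
        have h2 := List.of_mem_filter hx'
        simpa using h2
      rw [count_filter_ne x k t hxk, List.count_cons]
      simp [Ne.symm hxk]
    refine Prod.ext ?_ ?_
    · simp
    · show counts ++ _ ++ _ = _
      rw [hlen, List.map_cons, ← hmap]
      simp

-- ===== VERDICT (by name: the statement is the Claim_ definition above) =====
theorem Count_spec : Claim_equal_Count := by
  intro rows title _ _
  unfold Spec_Count Count Count_alt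
  cases hidx : PySem.List.index? (rows.headD []) title with
  | none => rfl
  | some num =>
    simp only [a_fold_eq, b_fold_eq, List.nil_append, groupLoop_eq]
    rw [PySem.Dict.foldl_insert_getD_add_one_eq_counter]
    refine Prod.ext ?_ ?_
    · simp [PySem.Dict.keys_counter]
    · show (PySem.Dict.counter _).values = _
      simp [PySem.Dict.values, PySem.Dict.items_counter, Function.comp]
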